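-- pv_equiv track=rewrite | github.com/opinionated-systems/hyperspace | replication/results/replication_v1/arm_b_freeze/seed45/gen_135/repo/task_agent.py | _find_comment_start
-- ===== SOURCE A (Python) =====
-- def _find_comment_start(line: str) -> int:
--     """Find the start of a // comment in a line, respecting quoted strings.
--
--     Args:
--         line: The line to search.
--
--     Returns:
--         Index of comment start or -1 if not found.
--     """
--     in_string = False
--     escape_next = False
--     for i, char in enumerate(line):
--         if escape_next:
--             escape_next = False
--             continue
--         if char == '\\':
--             escape_next = True
--             continue
--         if char == '"' and not in_string:
--             in_string = True
--         elif char == '"' and in_string: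
--             in_string = False
--         elif not in_string and char == '/' and i + 1 < len(line) and line[i + 1] == '/':
--             return i
--     return -1
-- ===== SOURCE B (Python) =====
-- def _find_comment_start(line: str) -> int:
--     """Find the start of a // comment in a line, respecting quoted strings.
--
--     Index-based scan: string literals are consumed by an inner loop instead of
--     a persistent in_string flag."""
--     n = len(line)
--     i = 0
--     while i < n:
--         c = line[i]
--         if c == '\\':
--             i += 2
--         elif c == '"':
--             i += 1
--             while i < n:
--                 if line[i] == '\\':
--                     i += 2
--                 elif line[i] == '"':
--                     i += 1
--                     break
--                 else:
--                     i += 1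
--         elif c == '/' and i + 1 < n and line[i + 1] == '/':
--             return i
--         else:
--             i += 1
--     return -1
-- ===== Notes on version B (the rewrite author's own statement) =====
-- stated objective: alternative
-- what changed: Replaces A's single pass with persistent in_string/escape_next boolean flags by an index-advancing outer scan that, on a double quote, hands control to an inner loop consuming the whole string literal (skipping two characters on a backslash).
import Mathlib
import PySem

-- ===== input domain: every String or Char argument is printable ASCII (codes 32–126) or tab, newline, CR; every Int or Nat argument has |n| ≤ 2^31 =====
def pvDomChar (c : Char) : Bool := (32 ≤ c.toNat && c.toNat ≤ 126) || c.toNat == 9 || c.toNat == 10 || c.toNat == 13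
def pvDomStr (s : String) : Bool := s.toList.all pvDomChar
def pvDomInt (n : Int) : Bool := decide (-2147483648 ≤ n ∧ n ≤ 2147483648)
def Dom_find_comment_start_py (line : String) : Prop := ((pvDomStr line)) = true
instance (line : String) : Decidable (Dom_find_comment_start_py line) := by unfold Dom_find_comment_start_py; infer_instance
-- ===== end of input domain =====

-- B replaces A's in_string/escape_next flag state machine by an index scan that consumes
-- whole string literals in an inner loop (objective: alternative decomposition, same cost).

-- ===== PORT A =====
-- A's enumerate loop as structural recursion over the characters, carrying
-- (index, in_string, escape_next); 'line[i+1]' is the head of the remaining list.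
def fcsA : List Char → Int → Bool → Bool → Int
  | [], _, _, _ => -1
  | c :: rest, i, instr, esc =>
    if esc then fcsA rest (i + 1) instr false
    else if c = '\\' then fcsA rest (i + 1) instr true
    else if c = '"' && !instr then fcsA rest (i + 1) true false
    else if c = '"' && instr then fcsA rest (i + 1) false false
    else if !instr && c = '/' && rest.head? = some '/' then i
    else fcsA rest (i + 1) instr false

def find_comment_start_py (line : String) : Int := fcsA line.toList 0 false false

-- ===== PORT B =====
-- the inner while loop of B: consume a string literal, returning the rest and index
def fcsConsume : List Char → Int → List Char × Int
  | [], i => ([], i)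
  | c :: rest, i =>
    if c = '\\' then fcsConsume (rest.drop 1) (i + 2)
    else if c = '"' then (rest, i + 1)
    else fcsConsume rest (i + 1)
  termination_by cs _ => cs.length
  decreasing_by all_goals (simp; try omega)

theorem fcsConsume_fst_length_le : ∀ (cs : List Char) (i : Int),
    (fcsConsume cs i).1.length ≤ cs.length := by
  intro cs i
  fun_induction fcsConsume cs i with
  | case1 i => simp
  | case2 rest i ih => exact le_trans ih (by simp; omega)
  | case3 rest i h => simp
  | case4 c rest i h h' ih => exact le_trans ih (by simp)

-- the outer while loop of B
def fcsB : List Char → Int → Int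
  | [], _ => -1
  | c :: rest, i =>
    if c = '\\' then fcsB (rest.drop 1) (i + 2)
    else if c = '"' then
      let p := fcsConsume rest (i + 1)
      fcsB p.1 p.2
    else if c = '/' && rest.head? = some '/' then i
    else fcsB rest (i + 1)
  termination_by cs _ => cs.length
  decreasing_by
    · simp
    · exact Nat.lt_succ_of_le (fcsConsume_fst_length_le _ _)
    · simp

def find_comment_start_py_alt (line : String) : Int := fcsB line.toList 0

-- ===== PRECONDITION & SPEC =====
def Spec_find_comment_start_py (line : String) (out : Int) : Prop := out = find_comment_start_py_alt line
instance (line : String) (out : Int) : Decidable (Spec_find_comment_start_py line out) := by unfold Spec_find_comment_start_py; infer_instance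

-- ===== CLAIM (what is proved, stated in full; the proofs are below) =====
def Claim_equal_find_comment_start_py : Prop := ∀ (line : String), Dom_find_comment_start_py line → Spec_find_comment_start_py line (find_comment_start_py line)

-- ===== LEMMAS AND PROOFS =====

-- A inside a string behaves like B's inner consume loop followed by A outside a string
theorem fcsA_instr (cs : List Char) (i : Int) :
    fcsA cs i true false = fcsA (fcsConsume cs i).1 (fcsConsume cs i).2 false false := by
  fun_induction fcsConsume cs i with
  | case1 i => simp [fcsA]
  | case2 rest i ih =>
    cases rest with
    | nil => simp [fcsA, fcsConsume]
    | cons d r =>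
      have h2 : i + 1 + 1 = i + 2 := by ring
      simpa [fcsA, h2] using ih
  | case3 rest i h => simp [fcsA]
  | case4 c rest i h h' ih => simpa [fcsA, h, h'] using ih

theorem fcsB_eq_fcsA (cs : List Char) (i : Int) :
    fcsB cs i = fcsA cs i false false := by
  fun_induction fcsB cs i with
  | case1 i => simp [fcsA]
  | case2 rest i ih =>
    cases rest with
    | nil => simp [fcsA, fcsB]
    | cons d r =>
      have h2 : i + 1 + 1 = i + 2 := by ring
      simpa [fcsA, h2] using ih
  | case3 rest i p h ih =>
    rw [ih]
    show fcsA (fcsConsume rest (i + 1)).1 (fcsConsume rest (i + 1)).2 false false = _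
    rw [← fcsA_instr]
    simp [fcsA]
  | case4 c rest i h h' h'' => simp [fcsA, h, h', h'']
  | case5 c rest i h h' h'' ih => simpa [fcsA, h, h', h''] using ih

-- ===== VERDICT (by name: the statement is the Claim_ definition above) =====
theorem find_comment_start_py_spec : Claim_equal_find_comment_start_py := by
  intro line _
  unfold Spec_find_comment_start_py find_comment_start_py find_comment_start_py_alt
  exact (fcsB_eq_fcsA _ _).symm
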